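-- pv_equiv track=rewrite | github.com/deckercjames/img_to_sand | testing/unit_tests/test_elaborator/test_blob_elaborator.py | helper_get_path_visual
-- ===== SOURCE A (Python) =====
-- def helper_get_path_visual(path, num_rows, num_cols):
--
--     # break the contour list into a grid of horizontal and vertical boundaries ("fences")
--     hor_fences  = [[False for _ in range(num_cols)] for _ in range(num_rows + 1)]
--     vert_fences = [[False for _ in range(num_cols + 1)] for _ in range(num_rows)]
--
--     # populate fence tables
--     for i in range(len(path)-1):
--         r, c = path[i+1]
--         prev_r, prev_c = path[i]
--         if r == prev_r and c == prev_c: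
--             continue
--         if r == prev_r:
--             hor_fences[r][min(c, prev_c)] = True
--         elif c == prev_c:
--             vert_fences[min(r, prev_r)][c] = True
--         else:
--             raise Exception("Somethiing has gone horribally wrong")
--
--     # convert polulated fences to string
--     buf = ""
--     for i in range(num_rows):
--         # hor fences
--         for c in range(num_cols):
--             buf += "+"
--             buf += '--' if hor_fences[i][c] else "  "
--         buf += "+\n"
--         # vert fences
--         for c in range(num_cols + 1):
--             buf += "|" if vert_fences[i][c] else " "
--             if c != num_cols:
--                 buf += "  "
--         buf += "\n"
--     # last hor fence row
--     for c in range(num_cols):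
--         buf += "+"
--         buf += '--' if hor_fences[num_rows][c] else "  "
--     buf += "+\n"
--     return buf
-- ===== SOURCE B (Python) =====
-- def helper_get_path_visual(path, num_rows, num_cols):
--     # character canvas: '+' corners pre-placed, then paint edges directly from the path
--     canvas = [[('+' if rr % 2 == 0 and cc % 3 == 0 else ' ')
--                for cc in range(3 * num_cols + 1)]
--               for rr in range(2 * num_rows + 1)]
--     for (prev_r, prev_c), (r, c) in zip(path, path[1:]):
--         if r == prev_r and c == prev_c:
--             continue
--         if r == prev_r:
--             m = min(c, prev_c)
--             canvas[2 * r][3 * m + 1] = '-'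
--             canvas[2 * r][3 * m + 2] = '-'
--         elif c == prev_c:
--             canvas[2 * min(r, prev_r) + 1][3 * c] = '|'
--         else:
--             raise Exception("Somethiing has gone horribally wrong")
--     return '\n'.join(''.join(row) for row in canvas) + '\n'
-- ===== Notes on version B (the rewrite author's own statement) =====
-- stated objective: alternative
-- what changed: Replaces A's two boolean fence tables plus a second character-by-character rendering pass with a single 2D character canvas: '+' corners are pre-placed, each path edge paints its '--' or '|' characters directly at computed canvas coordinates, and the rows are joined once.
-- outside the precondition, e.g. on helper_get_path_visual([], -1, 0): A returns '+\n', B returns '\n'; on helper_get_path_visual([], 2, -1): A returns '+\n\n+\n\n+\n', B returns '\n\n\n\n\n'; on helper_get_path_visual([(-1, 0), (-1, 1)], 1, 1): A returns '+  +\n    \n+--+\n', B returns '+  +\n -- \n+  +\n'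
import Mathlib
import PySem

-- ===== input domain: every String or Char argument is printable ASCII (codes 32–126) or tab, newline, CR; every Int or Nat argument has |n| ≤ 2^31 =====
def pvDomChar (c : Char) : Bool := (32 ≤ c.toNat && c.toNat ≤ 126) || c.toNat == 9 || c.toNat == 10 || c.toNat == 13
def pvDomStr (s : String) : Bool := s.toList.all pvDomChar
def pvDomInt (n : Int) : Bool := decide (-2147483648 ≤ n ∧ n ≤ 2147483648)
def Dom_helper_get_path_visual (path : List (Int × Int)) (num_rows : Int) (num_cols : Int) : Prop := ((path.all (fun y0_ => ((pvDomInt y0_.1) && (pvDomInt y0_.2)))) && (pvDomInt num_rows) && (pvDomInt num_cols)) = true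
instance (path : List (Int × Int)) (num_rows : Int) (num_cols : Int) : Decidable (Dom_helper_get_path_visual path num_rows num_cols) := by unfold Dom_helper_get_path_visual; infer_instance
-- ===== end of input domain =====

-- B replaces A's boolean fence tables + second rendering pass with a single character canvas painted directly from the path (alternative; same cost).


-- ===== PORT A =====
def helper_get_path_visual (path : List (Int × Int)) (num_rows : Int) (num_cols : Int) : String :=
  -- hor_fences / vert_fences tables of False
  let hor_fences : List (List Bool) :=
    (PySem.List.pyRange 0 (num_rows + 1) 1).map (fun _ => (PySem.List.pyRange 0 num_cols 1).map (fun _ => false))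
  let vert_fences : List (List Bool) :=
    (PySem.List.pyRange 0 num_rows 1).map (fun _ => (PySem.List.pyRange 0 (num_cols + 1) 1).map (fun _ => false))
  -- populate fence tables: for i in range(len(path)-1)
  let st :=
    (PySem.List.pyRange 0 ((path.length : Int) - 1) 1).foldl
      (fun (st : List (List Bool) × List (List Bool)) i =>
        let rc := PySem.List.pyGetD path (i + 1) (0, 0)       -- r, c = path[i+1]  (in range under Pre_)
        let prc := PySem.List.pyGetD path i (0, 0)            -- prev_r, prev_c = path[i]
        if rc.1 = prc.1 ∧ rc.2 = prc.2 then st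
        else if rc.1 = prc.1 then
          (PySem.List.pySetD st.1 rc.1
             (PySem.List.pySetD (PySem.List.pyGetD st.1 rc.1 []) (min rc.2 prc.2) true), st.2)
        else if rc.2 = prc.2 then
          (st.1, PySem.List.pySetD st.2 (min rc.1 prc.1)
             (PySem.List.pySetD (PySem.List.pyGetD st.2 (min rc.1 prc.1) []) rc.2 true))
        else st)                                              -- Python raises here; excluded by Pre_
      (hor_fences, vert_fences)
  -- convert populated fences to string (buf as List Char; returned via String.ofList)
  let buf : List Char :=
    (PySem.List.pyRange 0 num_rows 1).foldl (fun buf i =>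
      let buf := (PySem.List.pyRange 0 num_cols 1).foldl (fun buf c =>
        (buf ++ ['+']) ++
          (if PySem.List.pyGetD (PySem.List.pyGetD st.1 i []) c false then ['-', '-'] else [' ', ' '])) buf
      let buf := buf ++ ['+', '\n']
      let buf := (PySem.List.pyRange 0 (num_cols + 1) 1).foldl (fun buf c =>
        let buf := buf ++
          (if PySem.List.pyGetD (PySem.List.pyGetD st.2 i []) c false then ['|'] else [' '])
        if c ≠ num_cols then buf ++ [' ', ' '] else buf) buf
      buf ++ ['\n']) []
  let buf :=
    (PySem.List.pyRange 0 num_cols 1).foldl (fun buf c =>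
      (buf ++ ['+']) ++
        (if PySem.List.pyGetD (PySem.List.pyGetD st.1 num_rows []) c false then ['-', '-'] else [' ', ' '])) buf
  String.ofList (buf ++ ['+', '\n'])

-- ===== PORT B =====
def helper_get_path_visual_alt (path : List (Int × Int)) (num_rows : Int) (num_cols : Int) : String :=
  -- character canvas with '+' corners pre-placed
  let canvas : List (List Char) :=
    (PySem.List.pyRange 0 (2 * num_rows + 1) 1).map (fun rr =>
      (PySem.List.pyRange 0 (3 * num_cols + 1) 1).map (fun cc =>
        if PySem.Int.mod rr 2 = 0 ∧ PySem.Int.mod cc 3 = 0 then '+' else ' '))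
  -- paint edges directly from zip(path, path[1:])
  let canvas :=
    (path.zip (PySem.List.slice path (some 1) none)).foldl
      (fun (canvas : List (List Char)) pq =>
        if pq.2.1 = pq.1.1 ∧ pq.2.2 = pq.1.2 then canvas
        else if pq.2.1 = pq.1.1 then
          let m := min pq.2.2 pq.1.2
          PySem.List.pySetD canvas (2 * pq.2.1)
            (PySem.List.pySetD
              (PySem.List.pySetD (PySem.List.pyGetD canvas (2 * pq.2.1) []) (3 * m + 1) '-')
              (3 * m + 2) '-')
        else if pq.2.2 = pq.1.2 then
          PySem.List.pySetD canvas (2 * min pq.2.1 pq.1.1 + 1)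
            (PySem.List.pySetD (PySem.List.pyGetD canvas (2 * min pq.2.1 pq.1.1 + 1) []) (3 * pq.2.2) '|')
        else canvas)                                          -- Python raises here; excluded by Pre_
      canvas
  String.ofList (PySem.Chars.join ['\n'] canvas ++ ['\n'])

-- ===== PRECONDITION & SPEC =====
-- each consecutive distinct pair of path points must be axis-aligned and its fence segment inside the grid
def pvPairOK (nr nc : Int) (p q : Int × Int) : Prop :=
  (q.1 = p.1 ∧ q.2 = p.2) ∨
  (q.1 = p.1 ∧ ¬ q.2 = p.2 ∧ 0 ≤ q.1 ∧ q.1 ≤ nr ∧ 0 ≤ min q.2 p.2 ∧ min q.2 p.2 < nc) ∨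
  (¬ q.1 = p.1 ∧ q.2 = p.2 ∧ 0 ≤ min q.1 p.1 ∧ min q.1 p.1 < nr ∧ 0 ≤ q.2 ∧ q.2 ≤ nc)

-- Pre_ excludes: negative grid dimensions (outside the task's natural domain; A's leftover '+' lines
-- there are an artefact of its loop structure and A even raises IndexError for num_rows < 0 < num_cols),
-- diagonal consecutive moves (A raises Exception), and fence segments outside the grid (A raises
-- IndexError for too-large coordinates and silently wraps negative ones, a Python-indexing artefact).
def Pre_helper_get_path_visual (path : List (Int × Int)) (num_rows : Int) (num_cols : Int) : Prop :=
  0 ≤ num_rows ∧ 0 ≤ num_cols ∧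
  (∀ pq ∈ path.zip path.tail, pvPairOK num_rows num_cols pq.1 pq.2)
instance (path : List (Int × Int)) (num_rows : Int) (num_cols : Int) : Decidable (Pre_helper_get_path_visual path num_rows num_cols) := by unfold Pre_helper_get_path_visual pvPairOK; infer_instance

def pvWitness_helper_get_path_visual : (List (Int × Int)) × Int × Int := ([(0, 0), (0, 1), (1, 1)], 1, 1)

def Spec_helper_get_path_visual (path : List (Int × Int)) (num_rows : Int) (num_cols : Int) (out : String) : Prop := out = helper_get_path_visual_alt path num_rows num_cols
instance (path : List (Int × Int)) (num_rows : Int) (num_cols : Int) (out : String) : Decidable (Spec_helper_get_path_visual path num_rows num_cols out) := by unfold Spec_helper_get_path_visual; infer_instance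

-- ===== CLAIM (what is proved, stated in full; the proofs are below) =====
def Claim_equal_helper_get_path_visual : Prop := ∀ (path : List (Int × Int)) (num_rows : Int) (num_cols : Int), Dom_helper_get_path_visual path num_rows num_cols → Pre_helper_get_path_visual path num_rows num_cols → Spec_helper_get_path_visual path num_rows num_cols (helper_get_path_visual path num_rows num_cols)

-- ===== LEMMAS AND PROOFS =====

theorem pv_getD_set {α : Type} (xs : List α) (k : Nat) (i : Int) (d v : α) (hi : 0 ≤ i) :
    PySem.List.pyGetD (xs.set k v) i d = if i = (k : Int) ∧ k < xs.length then v else PySem.List.pyGetD xs i d := by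
  simp only [PySem.List.pyGetD, PySem.List.pyGet?_of_nonneg _ hi, List.getElem?_set]
  by_cases hik : i = (k : Int)
  · subst hik
    by_cases hlen : k < xs.length <;> simp [Int.toNat_natCast, hlen]
  · have : ¬ k = i.toNat := by omega
    simp [this, hik]

theorem pv_getD_default {α : Type} (xs : List α) (i : Int) (d : α) (hi : 0 ≤ i)
    (h : (xs.length : Int) ≤ i) : PySem.List.pyGetD xs i d = d := by
  simp only [PySem.List.pyGetD, PySem.List.pyGet?_of_nonneg _ hi]
  rw [List.getElem?_eq_none (by omega)]
  rfl

theorem pv_getD_const {α β : Type} (l : List β) (x : α) (i : Int) (hi : 0 ≤ i) :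
    PySem.List.pyGetD (l.map (fun _ => x)) i x = x := by
  by_cases h : i < ((l.map (fun _ => x)).length : Int)
  · rw [PySem.List.pyGetD_eq_getElem _ _ hi h, List.getElem_map]
  · exact pv_getD_default _ _ _ hi (by omega)

theorem pv_fold_pairs {α σ : Type} (g : σ → α → α → σ) (d : α) :
    ∀ (xs : List α) (init : σ),
      (List.range (xs.length - 1)).foldl (fun st k => g st (xs.getD k d) (xs.getD (k + 1) d)) init
        = (xs.zip xs.tail).foldl (fun st p => g st p.1 p.2) init := by
  intro xs
  induction xs with
  | nil => intro init; rfl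
  | cons x t ih =>
    intro init
    cases t with
    | nil => rfl
    | cons y t' =>
      have hlen : (x :: y :: t').length - 1 = (y :: t').length - 1 + 1 := by simp
      rw [hlen, List.range_succ_eq_map]
      simp only [List.foldl_cons, List.foldl_map, List.getD_cons_succ, List.getD_cons_zero]
      simpa using ih (g init x y)

-- the single fence-table update step of A, as a named function
def pvStepA (st : List (List Bool) × List (List Bool)) (p q : Int × Int) :
    List (List Bool) × List (List Bool) :=
  if q.1 = p.1 ∧ q.2 = p.2 then st
  else if q.1 = p.1 then
    (PySem.List.pySetD st.1 q.1
      (PySem.List.pySetD (PySem.List.pyGetD st.1 q.1 []) (min q.2 p.2) true), st.2)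
  else if q.2 = p.2 then
    (st.1, PySem.List.pySetD st.2 (min q.1 p.1)
      (PySem.List.pySetD (PySem.List.pyGetD st.2 (min q.1 p.1) []) q.2 true))
  else st

-- the single canvas painting step of B, as a named function
def pvPaint (canvas : List (List Char)) (p q : Int × Int) : List (List Char) :=
  if q.1 = p.1 ∧ q.2 = p.2 then canvas
  else if q.1 = p.1 then
    PySem.List.pySetD canvas (2 * q.1)
      (PySem.List.pySetD
        (PySem.List.pySetD (PySem.List.pyGetD canvas (2 * q.1) []) (3 * min q.2 p.2 + 1) '-')
        (3 * min q.2 p.2 + 2) '-')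
  else if q.2 = p.2 then
    PySem.List.pySetD canvas (2 * min q.1 p.1 + 1)
      (PySem.List.pySetD (PySem.List.pyGetD canvas (2 * min q.1 p.1 + 1) []) (3 * q.2) '|')
  else canvas

-- table lookups (with Python's default-free getD lowered to the false/[] defaults A uses)
def pvLk1 (t : List (List Bool) × List (List Bool)) (i c : Int) : Bool :=
  PySem.List.pyGetD (PySem.List.pyGetD t.1 i []) c false
def pvLk2 (t : List (List Bool) × List (List Bool)) (i c : Int) : Bool :=
  PySem.List.pyGetD (PySem.List.pyGetD t.2 i []) c false

-- the character at canvas position (rr, cc) as a function of the fence tables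
def pvCell (t : List (List Bool) × List (List Bool)) (rr cc : Nat) : Char :=
  if rr % 2 = 0 then
    if cc % 3 = 0 then '+' else if pvLk1 t ((rr / 2 : Nat) : Int) ((cc / 3 : Nat) : Int) then '-' else ' '
  else
    if cc % 3 = 0 then (if pvLk2 t ((rr / 2 : Nat) : Int) ((cc / 3 : Nat) : Int) then '|' else ' ') else ' '

def pvCanvasOf (t : List (List Bool) × List (List Bool)) (nr nc : Nat) : List (List Char) :=
  (List.range (2 * nr + 1)).map (fun rr => (List.range (3 * nc + 1)).map (fun cc => pvCell t rr cc))

def pvShape (nr nc : Int) (t : List (List Bool) × List (List Bool)) : Prop :=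
  t.1.length = (nr + 1).toNat ∧ (∀ row ∈ t.1, row.length = nc.toNat) ∧
  t.2.length = nr.toNat ∧ (∀ row ∈ t.2, row.length = (nc + 1).toNat)

def pvInitT (nr nc : Int) : List (List Bool) × List (List Bool) :=
  ((PySem.List.pyRange 0 (nr + 1) 1).map (fun _ => (PySem.List.pyRange 0 nc 1).map (fun _ => false)),
   (PySem.List.pyRange 0 nr 1).map (fun _ => (PySem.List.pyRange 0 (nc + 1) 1).map (fun _ => false)))

def pvFenceA (path : List (Int × Int)) (nr nc : Int) : List (List Bool) × List (List Bool) :=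
  (PySem.List.pyRange 0 ((path.length : Int) - 1) 1).foldl
    (fun (st : List (List Bool) × List (List Bool)) i =>
      let rc := PySem.List.pyGetD path (i + 1) (0, 0)
      let prc := PySem.List.pyGetD path i (0, 0)
      if rc.1 = prc.1 ∧ rc.2 = prc.2 then st
      else if rc.1 = prc.1 then
        (PySem.List.pySetD st.1 rc.1
           (PySem.List.pySetD (PySem.List.pyGetD st.1 rc.1 []) (min rc.2 prc.2) true), st.2)
      else if rc.2 = prc.2 then
        (st.1, PySem.List.pySetD st.2 (min rc.1 prc.1)
           (PySem.List.pySetD (PySem.List.pyGetD st.2 (min rc.1 prc.1) []) rc.2 true))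
      else st)
    (pvInitT nr nc)

def pvRenderA (st : List (List Bool) × List (List Bool)) (nr nc : Int) : List Char :=
  ((PySem.List.pyRange 0 nc 1).foldl (fun buf c =>
      (buf ++ ['+']) ++
        (if PySem.List.pyGetD (PySem.List.pyGetD st.1 nr []) c false then ['-', '-'] else [' ', ' ']))
    ((PySem.List.pyRange 0 nr 1).foldl (fun buf i =>
      ((PySem.List.pyRange 0 (nc + 1) 1).foldl (fun buf c =>
        let buf := buf ++
          (if PySem.List.pyGetD (PySem.List.pyGetD st.2 i []) c false then ['|'] else [' '])
        if c ≠ nc then buf ++ [' ', ' '] else buf)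
        ((PySem.List.pyRange 0 nc 1).foldl (fun buf c =>
          (buf ++ ['+']) ++
            (if PySem.List.pyGetD (PySem.List.pyGetD st.1 i []) c false then ['-', '-'] else [' ', ' '])) buf
         ++ ['+', '\n'])) ++ ['\n']) [])) ++ ['+', '\n']

theorem pvA_eq (path : List (Int × Int)) (nr nc : Int) :
    helper_get_path_visual path nr nc = String.ofList (pvRenderA (pvFenceA path nr nc) nr nc) := rfl

def pvInitCanvas (nr nc : Int) : List (List Char) :=
  (PySem.List.pyRange 0 (2 * nr + 1) 1).map (fun rr =>
    (PySem.List.pyRange 0 (3 * nc + 1) 1).map (fun cc =>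
      if PySem.Int.mod rr 2 = 0 ∧ PySem.Int.mod cc 3 = 0 then '+' else ' '))

def pvCanvasB (path : List (Int × Int)) (nr nc : Int) : List (List Char) :=
  (path.zip (PySem.List.slice path (some 1) none)).foldl
    (fun (canvas : List (List Char)) pq =>
      if pq.2.1 = pq.1.1 ∧ pq.2.2 = pq.1.2 then canvas
      else if pq.2.1 = pq.1.1 then
        let m := min pq.2.2 pq.1.2
        PySem.List.pySetD canvas (2 * pq.2.1)
          (PySem.List.pySetD
            (PySem.List.pySetD (PySem.List.pyGetD canvas (2 * pq.2.1) []) (3 * m + 1) '-')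
            (3 * m + 2) '-')
      else if pq.2.2 = pq.1.2 then
        PySem.List.pySetD canvas (2 * min pq.2.1 pq.1.1 + 1)
          (PySem.List.pySetD (PySem.List.pyGetD canvas (2 * min pq.2.1 pq.1.1 + 1) []) (3 * pq.2.2) '|')
      else canvas)
    (pvInitCanvas nr nc)

theorem pvB_eq (path : List (Int × Int)) (nr nc : Int) :
    helper_get_path_visual_alt path nr nc
      = String.ofList (PySem.Chars.join ['\n'] (pvCanvasB path nr nc) ++ ['\n']) := rfl

theorem pvFenceA_eq (path : List (Int × Int)) (nr nc : Int) :
    pvFenceA path nr nc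
      = (path.zip path.tail).foldl (fun st pq => pvStepA st pq.1 pq.2) (pvInitT nr nc) := by
  unfold pvFenceA
  rw [PySem.List.pyRange_one]
  have hlen : ((path.length : Int) - 1 - 0).toNat = path.length - 1 := by omega
  rw [hlen, List.foldl_map]
  simp only [zero_add, ← Nat.cast_add_one, PySem.List.pyGetD_natCast]
  exact pv_fold_pairs pvStepA (0, 0) path (pvInitT nr nc)

theorem pvCanvasB_eq (path : List (Int × Int)) (nr nc : Int) :
    pvCanvasB path nr nc
      = (path.zip path.tail).foldl (fun cv pq => pvPaint cv pq.1 pq.2) (pvInitCanvas nr nc) := by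
  unfold pvCanvasB
  rw [PySem.List.slice_from_one]
  rfl

-- lookups in the initial (all-false) tables
theorem pv_init_lookup (nr nc : Int) (i c : Int) (hi : 0 ≤ i) (hc : 0 ≤ c) :
    pvLk1 (pvInitT nr nc) i c = false ∧ pvLk2 (pvInitT nr nc) i c = false := by
  have houter : ∀ (R X : Int),
      PySem.List.pyGetD (PySem.List.pyGetD
        ((PySem.List.pyRange 0 R 1).map (fun _ => (PySem.List.pyRange 0 X 1).map (fun _ => false))) i [])
        c false = false := by
    intro R X
    by_cases h : i < (((PySem.List.pyRange 0 R 1).map (fun _ => (PySem.List.pyRange 0 X 1).map (fun _ => false))).length : Int)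
    · rw [PySem.List.pyGetD_eq_getElem _ _ hi h, List.getElem_map]
      exact pv_getD_const _ _ _ hc
    · rw [pv_getD_default _ _ _ hi (by omega)]
      simp [PySem.List.pyGetD, PySem.List.pyGet?_of_nonneg _ hc]
  exact ⟨houter _ _, houter _ _⟩

theorem pv_init_shape (nr nc : Int) : pvShape nr nc (pvInitT nr nc) := by
  refine ⟨?_, ?_, ?_, ?_⟩
  · simp [pvInitT, PySem.List.length_pyRange_one]
  · intro row hmem
    rcases List.mem_map.mp hmem with ⟨_, _, rfl⟩
    simp [PySem.List.length_pyRange_one]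
  · simp [pvInitT, PySem.List.length_pyRange_one]
  · intro row hmem
    rcases List.mem_map.mp hmem with ⟨_, _, rfl⟩
    simp [PySem.List.length_pyRange_one]

-- updating a well-shaped table flips exactly one lookup
theorem pv_table_upd (t : List (List Bool)) (R C r m : Int)
    (hlen : t.length = R.toNat) (hrows : ∀ row ∈ t, row.length = C.toNat)
    (hr : 0 ≤ r) (hrR : r < R) (hm : 0 ≤ m) (hmC : m < C) :
    let t' := PySem.List.pySetD t r (PySem.List.pySetD (PySem.List.pyGetD t r []) m true)
    t'.length = R.toNat ∧ (∀ row ∈ t', row.length = C.toNat) ∧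
    (∀ i c : Int, 0 ≤ i → 0 ≤ c →
      PySem.List.pyGetD (PySem.List.pyGetD t' i []) c false
        = if i = r ∧ c = m then true else PySem.List.pyGetD (PySem.List.pyGetD t i []) c false) := by
  intro t'
  have hrlen : r.toNat < t.length := by omega
  have hrow : PySem.List.pyGetD t r [] = t[r.toNat] :=
    PySem.List.pyGetD_eq_getElem t [] hr (by omega)
  have hrowlen : t[r.toNat].length = C.toNat := hrows _ (List.getElem_mem hrlen)
  have ht' : t' = t.set r.toNat (t[r.toNat].set m.toNat true) := by
    simp only [t', PySem.List.pySetD_of_nonneg _ _ hr, PySem.List.pySetD_of_nonneg _ _ hm, hrow]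
  refine ⟨by simp [ht', hlen], ?_, ?_⟩
  · intro row hrowmem
    rw [ht'] at hrowmem
    rcases List.mem_or_eq_of_mem_set hrowmem with h | h
    · exact hrows _ h
    · subst h; simp [hrowlen]
  · intro i c hi hc
    have hrc : (r.toNat : Int) = r := Int.toNat_of_nonneg hr
    have hmc : (m.toNat : Int) = m := Int.toNat_of_nonneg hm
    rw [ht', pv_getD_set _ _ _ _ _ hi, hrc]
    by_cases hir : i = r
    · subst hir
      rw [if_pos ⟨rfl, hrlen⟩, pv_getD_set _ _ _ _ _ hc, hmc]
      by_cases hcm : c = m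
      · subst hcm
        rw [if_pos ⟨rfl, by omega⟩, if_pos ⟨rfl, rfl⟩]
      · rw [if_neg (by tauto), if_neg (by tauto), ← hrow]
    · rw [if_neg (by tauto), if_neg (by tauto)]

-- convenient characterisation of pvStepA's effect on lookups, plus shape preservation
theorem pv_stepA_shape (nr nc : Int) (p q : Int × Int) (hok : pvPairOK nr nc p q)
    (t : List (List Bool) × List (List Bool)) (hsh : pvShape nr nc t) :
    pvShape nr nc (pvStepA t p q) := by
  obtain ⟨h1, h2, h3, h4⟩ := hsh
  unfold pvStepA
  rcases hok with he | ⟨e2, hne, hb1, hb2, hb3, hb4⟩ | ⟨e2, e3, hb1, hb2, hb3, hb4⟩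
  · simp only [if_pos he]; exact ⟨h1, h2, h3, h4⟩
  · rw [if_neg (show ¬(q.1 = p.1 ∧ q.2 = p.2) by tauto), if_pos e2]
    have hupd := pv_table_upd t.1 (nr + 1) nc q.1 (min q.2 p.2) h1 h2 hb1 (by omega) hb3 hb4
    exact ⟨hupd.1, hupd.2.1, h3, h4⟩
  · rw [if_neg (show ¬(q.1 = p.1 ∧ q.2 = p.2) by tauto), if_neg e2, if_pos e3]
    have hupd := pv_table_upd t.2 nr (nc + 1) (min q.1 p.1) q.2 h3 h4 hb1 hb2 hb3 (by omega)
    exact ⟨h1, h2, hupd.1, hupd.2.1⟩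

-- the cell values at the three positions of a grid chunk
theorem pv_cell_even (t : List (List Bool) × List (List Bool)) (i c : Nat) :
    pvCell t (2 * i) (3 * c) = '+' ∧
    pvCell t (2 * i) (3 * c + 1) = (if pvLk1 t (i : Int) (c : Int) then '-' else ' ') ∧
    pvCell t (2 * i) (3 * c + 2) = (if pvLk1 t (i : Int) (c : Int) then '-' else ' ') := by
  have h1 : 2 * i % 2 = 0 := by omega
  have h2 : 3 * c % 3 = 0 := by omega
  have h3 : (3 * c + 1) % 3 ≠ 0 := by omega
  have h4 : (3 * c + 2) % 3 ≠ 0 := by omega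
  have h5 : 2 * i / 2 = i := by omega
  have h6 : (3 * c + 1) / 3 = c := by omega
  have h7 : (3 * c + 2) / 3 = c := by omega
  refine ⟨?_, ?_, ?_⟩ <;> simp [pvCell, h1, h2, h3, h4, h5, h6, h7]

theorem pv_cell_odd (t : List (List Bool) × List (List Bool)) (i c : Nat) :
    pvCell t (2 * i + 1) (3 * c) = (if pvLk2 t (i : Int) (c : Int) then '|' else ' ') ∧
    pvCell t (2 * i + 1) (3 * c + 1) = ' ' ∧
    pvCell t (2 * i + 1) (3 * c + 2) = ' ' := by
  have h1 : (2 * i + 1) % 2 ≠ 0 := by omega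
  have h2 : 3 * c % 3 = 0 := by omega
  have h3 : (3 * c + 1) % 3 ≠ 0 := by omega
  have h4 : (3 * c + 2) % 3 ≠ 0 := by omega
  have h5 : (2 * i + 1) / 2 = i := by omega
  have h6 : 3 * c / 3 = c := by omega
  refine ⟨?_, ?_, ?_⟩ <;> simp [pvCell, h1, h2, h3, h4, h5, h6]

-- painting the horizontal edge (r, m) on the canvas of t = the canvas of the updated table
theorem pv_paint_hor (t t' : List (List Bool) × List (List Bool)) (nr nc : Nat) (r m : Int)
    (hr : 0 ≤ r) (hrle : r ≤ (nr : Int)) (hm : 0 ≤ m) (hmlt : m < (nc : Int))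
    (h1 : ∀ i c : Int, 0 ≤ i → 0 ≤ c →
      pvLk1 t' i c = if i = r ∧ c = m then true else pvLk1 t i c)
    (h2 : ∀ i c : Int, 0 ≤ i → 0 ≤ c → pvLk2 t' i c = pvLk2 t i c) :
    PySem.List.pySetD (pvCanvasOf t nr nc) (2 * r)
      (PySem.List.pySetD
        (PySem.List.pySetD (PySem.List.pyGetD (pvCanvasOf t nr nc) (2 * r) []) (3 * m + 1) '-')
        (3 * m + 2) '-')
      = pvCanvasOf t' nr nc := by
  obtain ⟨rN, rfl⟩ : ∃ k : Nat, r = (k : Int) := ⟨r.toNat, (Int.toNat_of_nonneg hr).symm⟩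
  obtain ⟨mN, rfl⟩ : ∃ k : Nat, m = (k : Int) := ⟨m.toNat, (Int.toNat_of_nonneg hm).symm⟩
  have hrN : rN ≤ nr := by exact_mod_cast hrle
  have hmN : mN < nc := by exact_mod_cast hmlt
  have hrow : PySem.List.pyGetD (pvCanvasOf t nr nc) (2 * (rN : Int)) []
      = (List.range (3 * nc + 1)).map (fun cc => pvCell t (2 * rN) cc) := by
    rw [show (2 * (rN : Int)) = ((2 * rN : Nat) : Int) by push_cast; ring,
        PySem.List.pyGetD_natCast]
    unfold pvCanvasOf
    rw [List.getD_eq_getElem _ _ (by simp; omega), List.getElem_map, List.getElem_range]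
  rw [hrow,
      show (3 * (mN : Int) + 1) = ((3 * mN + 1 : Nat) : Int) by push_cast; ring,
      show (3 * (mN : Int) + 2) = ((3 * mN + 2 : Nat) : Int) by push_cast; ring,
      show (2 * (rN : Int)) = ((2 * rN : Nat) : Int) by push_cast; ring,
      PySem.List.pySetD_natCast, PySem.List.pySetD_natCast, PySem.List.pySetD_natCast]
  unfold pvCanvasOf
  apply List.ext_getElem (by simp)
  intro rr hrr _
  simp only [List.length_set, List.length_map, List.length_range] at hrr
  simp only [List.getElem_set, List.getElem_map, List.getElem_range]
  by_cases hre : 2 * rN = rr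
  · rw [if_pos hre]
    subst hre
    apply List.ext_getElem (by simp)
    intro cc hcc _
    simp only [List.length_set, List.length_map, List.length_range] at hcc
    simp only [List.getElem_set, List.getElem_map, List.getElem_range]
    by_cases he2 : 3 * mN + 2 = cc
    · subst he2
      rw [if_pos rfl]
      rcases pv_cell_even t' rN mN with ⟨-, -, h⟩
      rw [h, h1 _ _ (by positivity) (by positivity),
          if_pos (show ((rN : Nat) : Int) = ((rN : Nat) : Int) ∧ ((mN : Nat) : Int) = ((mN : Nat) : Int) from ⟨rfl, rfl⟩)]
      simp
    · rw [if_neg he2]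
      by_cases he1 : 3 * mN + 1 = cc
      · subst he1
        rw [if_pos rfl]
        rcases pv_cell_even t' rN mN with ⟨-, h, -⟩
        rw [h, h1 _ _ (by positivity) (by positivity),
          if_pos (show ((rN : Nat) : Int) = ((rN : Nat) : Int) ∧ ((mN : Nat) : Int) = ((mN : Nat) : Int) from ⟨rfl, rfl⟩)]
        simp
      · rw [if_neg he1]
        -- cc is not one of the two painted positions: cell unchanged
        rcases pv_cell_even t (rN) (cc / 3) with ⟨ha, hb, hc⟩
        rcases pv_cell_even t' (rN) (cc / 3) with ⟨ha', hb', hc'⟩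
        rcases (show cc % 3 = 0 ∨ cc % 3 = 1 ∨ cc % 3 = 2 by omega) with h0 | h0 | h0
        · rw [show cc = 3 * (cc / 3) by omega, ha, ha']
        · have hlk : pvLk1 t' ((rN : Nat) : Int) ((cc / 3 : Nat) : Int)
              = pvLk1 t ((rN : Nat) : Int) ((cc / 3 : Nat) : Int) := by
            rw [h1 _ _ (by positivity) (by positivity)]
            have hne : ¬ ((cc / 3 : Nat) : Int) = ((mN : Nat) : Int) := by
              intro h
              have : cc / 3 = mN := by exact_mod_cast h
              omega
            rw [if_neg (by tauto)]
          rw [show cc = 3 * (cc / 3) + 1 by omega, hb, hb', hlk]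
        · have hlk : pvLk1 t' ((rN : Nat) : Int) ((cc / 3 : Nat) : Int)
              = pvLk1 t ((rN : Nat) : Int) ((cc / 3 : Nat) : Int) := by
            rw [h1 _ _ (by positivity) (by positivity)]
            have hne : ¬ ((cc / 3 : Nat) : Int) = ((mN : Nat) : Int) := by
              intro h
              have : cc / 3 = mN := by exact_mod_cast h
              omega
            rw [if_neg (by tauto)]
          rw [show cc = 3 * (cc / 3) + 2 by omega, hc, hc', hlk]
  · rw [if_neg hre]
    apply List.map_congr_left
    intro cc _
    -- row rr untouched: pvCell agrees
    have hcq : cc = 3 * (cc / 3) + cc % 3 := by omega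
    by_cases hpar : rr % 2 = 0
    · -- even row, rr ≠ 2 rN, so row index rr/2 ≠ rN
      have hrow_ne : rr / 2 ≠ rN := by omega
      rcases pv_cell_even t (rr / 2) (cc / 3) with ⟨ha, hb, hc⟩
      rcases pv_cell_even t' (rr / 2) (cc / 3) with ⟨ha', hb', hc'⟩
      have hlk : pvLk1 t' ((rr / 2 : Nat) : Int) ((cc / 3 : Nat) : Int) = pvLk1 t ((rr / 2 : Nat) : Int) ((cc / 3 : Nat) : Int) := by
        rw [h1 _ _ (by positivity) (by positivity)]
        have : ¬ ((rr / 2 : Nat) : Int) = ((rN : Nat) : Int) := by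
          intro h; exact hrow_ne (by exact_mod_cast h)
        rw [if_neg (by tauto)]
      have hrr2 : rr = 2 * (rr / 2) := by omega
      rcases (show cc % 3 = 0 ∨ cc % 3 = 1 ∨ cc % 3 = 2 by omega) with h0 | h0 | h0
      · rw [show cc = 3 * (cc / 3) by omega, hrr2, ha, ha']
      · rw [show cc = 3 * (cc / 3) + 1 by omega, hrr2, hb, hb', hlk]
      · rw [show cc = 3 * (cc / 3) + 2 by omega, hrr2, hc, hc', hlk]
    · -- odd row: uses only t.2, unchanged
      rcases pv_cell_odd t (rr / 2) (cc / 3) with ⟨ha, hb, hc⟩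
      rcases pv_cell_odd t' (rr / 2) (cc / 3) with ⟨ha', hb', hc'⟩
      have hrr2 : rr = 2 * (rr / 2) + 1 := by omega
      rcases (show cc % 3 = 0 ∨ cc % 3 = 1 ∨ cc % 3 = 2 by omega) with h0 | h0 | h0
      · rw [show cc = 3 * (cc / 3) by omega, hrr2, ha, ha',
            h2 _ _ (by positivity) (by positivity)]
      · rw [show cc = 3 * (cc / 3) + 1 by omega, hrr2, hb, hb']
      · rw [show cc = 3 * (cc / 3) + 2 by omega, hrr2, hc, hc']


-- painting the vertical edge (r, m) on the canvas of t = the canvas of the updated table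
theorem pv_paint_vert (t t' : List (List Bool) × List (List Bool)) (nr nc : Nat) (r m : Int)
    (hr : 0 ≤ r) (hrlt : r < (nr : Int)) (hm : 0 ≤ m) (hmle : m ≤ (nc : Int))
    (h2 : ∀ i c : Int, 0 ≤ i → 0 ≤ c →
      pvLk2 t' i c = if i = r ∧ c = m then true else pvLk2 t i c)
    (h1 : ∀ i c : Int, 0 ≤ i → 0 ≤ c → pvLk1 t' i c = pvLk1 t i c) :
    PySem.List.pySetD (pvCanvasOf t nr nc) (2 * r + 1)
      (PySem.List.pySetD (PySem.List.pyGetD (pvCanvasOf t nr nc) (2 * r + 1) []) (3 * m) '|')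
      = pvCanvasOf t' nr nc := by
  obtain ⟨rN, rfl⟩ : ∃ k : Nat, r = (k : Int) := ⟨r.toNat, (Int.toNat_of_nonneg hr).symm⟩
  obtain ⟨mN, rfl⟩ : ∃ k : Nat, m = (k : Int) := ⟨m.toNat, (Int.toNat_of_nonneg hm).symm⟩
  have hrN : rN < nr := by exact_mod_cast hrlt
  have hmN : mN ≤ nc := by exact_mod_cast hmle
  have hrow : PySem.List.pyGetD (pvCanvasOf t nr nc) (2 * (rN : Int) + 1) []
      = (List.range (3 * nc + 1)).map (fun cc => pvCell t (2 * rN + 1) cc) := by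
    rw [show (2 * (rN : Int) + 1) = ((2 * rN + 1 : Nat) : Int) by push_cast; ring,
        PySem.List.pyGetD_natCast]
    unfold pvCanvasOf
    rw [List.getD_eq_getElem _ _ (by simp; omega), List.getElem_map, List.getElem_range]
  rw [hrow,
      show (3 * (mN : Int)) = ((3 * mN : Nat) : Int) by push_cast; ring,
      show (2 * (rN : Int) + 1) = ((2 * rN + 1 : Nat) : Int) by push_cast; ring,
      PySem.List.pySetD_natCast, PySem.List.pySetD_natCast]
  unfold pvCanvasOf
  apply List.ext_getElem (by simp)
  intro rr hrr _
  simp only [List.length_set, List.length_map, List.length_range] at hrr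
  simp only [List.getElem_set, List.getElem_map, List.getElem_range]
  by_cases hre : 2 * rN + 1 = rr
  · rw [if_pos hre]
    subst hre
    apply List.ext_getElem (by simp)
    intro cc hcc _
    simp only [List.length_set, List.length_map, List.length_range] at hcc
    simp only [List.getElem_set, List.getElem_map, List.getElem_range]
    by_cases he0 : 3 * mN = cc
    · subst he0
      rw [if_pos rfl]
      rcases pv_cell_odd t' rN mN with ⟨h, -, -⟩
      rw [h, h2 _ _ (by positivity) (by positivity),
          if_pos (show ((rN : Nat) : Int) = ((rN : Nat) : Int) ∧ ((mN : Nat) : Int) = ((mN : Nat) : Int) from ⟨rfl, rfl⟩)]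
      simp
    · rw [if_neg he0]
      rcases pv_cell_odd t rN (cc / 3) with ⟨ha, hb, hc⟩
      rcases pv_cell_odd t' rN (cc / 3) with ⟨ha', hb', hc'⟩
      rcases (show cc % 3 = 0 ∨ cc % 3 = 1 ∨ cc % 3 = 2 by omega) with h0 | h0 | h0
      · have hlk : pvLk2 t' ((rN : Nat) : Int) ((cc / 3 : Nat) : Int)
            = pvLk2 t ((rN : Nat) : Int) ((cc / 3 : Nat) : Int) := by
          rw [h2 _ _ (by positivity) (by positivity)]
          have hne : ¬ ((cc / 3 : Nat) : Int) = ((mN : Nat) : Int) := by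
            intro h
            have : cc / 3 = mN := by exact_mod_cast h
            omega
          rw [if_neg (by tauto)]
        rw [show cc = 3 * (cc / 3) by omega, ha, ha', hlk]
      · rw [show cc = 3 * (cc / 3) + 1 by omega, hb, hb']
      · rw [show cc = 3 * (cc / 3) + 2 by omega, hc, hc']
  · rw [if_neg hre]
    apply List.map_congr_left
    intro cc _
    by_cases hpar : rr % 2 = 0
    · -- even row: uses only t.1, unchanged
      rcases pv_cell_even t (rr / 2) (cc / 3) with ⟨ha, hb, hc⟩
      rcases pv_cell_even t' (rr / 2) (cc / 3) with ⟨ha', hb', hc'⟩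
      have hrr2 : rr = 2 * (rr / 2) := by omega
      have hlk := h1 ((rr / 2 : Nat) : Int) ((cc / 3 : Nat) : Int) (by positivity) (by positivity)
      rcases (show cc % 3 = 0 ∨ cc % 3 = 1 ∨ cc % 3 = 2 by omega) with h0 | h0 | h0
      · rw [show cc = 3 * (cc / 3) by omega, hrr2, ha, ha']
      · rw [show cc = 3 * (cc / 3) + 1 by omega, hrr2, hb, hb', hlk]
      · rw [show cc = 3 * (cc / 3) + 2 by omega, hrr2, hc, hc', hlk]
    · -- odd row, rr ≠ 2 rN + 1, so row index rr/2 ≠ rN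
      have hrow_ne : rr / 2 ≠ rN := by omega
      rcases pv_cell_odd t (rr / 2) (cc / 3) with ⟨ha, hb, hc⟩
      rcases pv_cell_odd t' (rr / 2) (cc / 3) with ⟨ha', hb', hc'⟩
      have hrr2 : rr = 2 * (rr / 2) + 1 := by omega
      have hlk : pvLk2 t' ((rr / 2 : Nat) : Int) ((cc / 3 : Nat) : Int)
          = pvLk2 t ((rr / 2 : Nat) : Int) ((cc / 3 : Nat) : Int) := by
        rw [h2 _ _ (by positivity) (by positivity)]
        have hne : ¬ ((rr / 2 : Nat) : Int) = ((rN : Nat) : Int) := by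
          intro h; exact hrow_ne (by exact_mod_cast h)
        rw [if_neg (by tauto)]
      rcases (show cc % 3 = 0 ∨ cc % 3 = 1 ∨ cc % 3 = 2 by omega) with h0 | h0 | h0
      · rw [show cc = 3 * (cc / 3) by omega, hrr2, ha, ha', hlk]
      · rw [show cc = 3 * (cc / 3) + 1 by omega, hrr2, hb, hb']
      · rw [show cc = 3 * (cc / 3) + 2 by omega, hrr2, hc, hc']

-- one painting step tracks one table update
theorem pv_paint_step (nr nc : Nat) (p q : Int × Int)
    (hok : pvPairOK (nr : Int) (nc : Int) p q)
    (t : List (List Bool) × List (List Bool)) (hsh : pvShape (nr : Int) (nc : Int) t) :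
    pvPaint (pvCanvasOf t nr nc) p q = pvCanvasOf (pvStepA t p q) nr nc := by
  obtain ⟨s1, s2, s3, s4⟩ := hsh
  unfold pvPaint pvStepA
  rcases hok with he | ⟨e2, hne, hb1, hb2, hb3, hb4⟩ | ⟨e2, e3, hb1, hb2, hb3, hb4⟩
  · simp only [if_pos he]
  · rw [if_neg (show ¬(q.1 = p.1 ∧ q.2 = p.2) by tauto),
        if_neg (show ¬(q.1 = p.1 ∧ q.2 = p.2) by tauto), if_pos e2, if_pos e2]
    have hupd := pv_table_upd t.1 ((nr : Int) + 1) (nc : Int) q.1 (min q.2 p.2) s1 s2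
      hb1 (by omega) hb3 hb4
    exact pv_paint_hor t
      (PySem.List.pySetD t.1 q.1
        (PySem.List.pySetD (PySem.List.pyGetD t.1 q.1 []) (min q.2 p.2) true), t.2)
      nr nc q.1 (min q.2 p.2) hb1 hb2 hb3 hb4
      (fun i c hi hc => hupd.2.2 i c hi hc) (fun i c hi hc => rfl)
  · rw [if_neg (show ¬(q.1 = p.1 ∧ q.2 = p.2) by tauto),
        if_neg (show ¬(q.1 = p.1 ∧ q.2 = p.2) by tauto), if_neg e2, if_neg e2,
        if_pos e3, if_pos e3]
    have hupd := pv_table_upd t.2 (nr : Int) ((nc : Int) + 1) (min q.1 p.1) q.2 s3 s4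
      hb1 hb2 hb3 (by omega)
    exact pv_paint_vert t
      (t.1, PySem.List.pySetD t.2 (min q.1 p.1)
        (PySem.List.pySetD (PySem.List.pyGetD t.2 (min q.1 p.1) []) q.2 true))
      nr nc (min q.1 p.1) q.2 hb1 hb2 hb3 hb4
      (fun i c hi hc => hupd.2.2 i c hi hc) (fun i c hi hc => rfl)

theorem pv_canvas_fold (nr nc : Nat) :
    ∀ (P : List ((Int × Int) × (Int × Int))) (t : List (List Bool) × List (List Bool)),
      (∀ pq ∈ P, pvPairOK (nr : Int) (nc : Int) pq.1 pq.2) →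
      pvShape (nr : Int) (nc : Int) t →
      P.foldl (fun cv pq => pvPaint cv pq.1 pq.2) (pvCanvasOf t nr nc)
        = pvCanvasOf (P.foldl (fun st pq => pvStepA st pq.1 pq.2) t) nr nc := by
  intro P
  induction P with
  | nil => intro t _ _; rfl
  | cons pq rest ih =>
    intro t hb hsh
    simp only [List.foldl_cons]
    rw [pv_paint_step nr nc pq.1 pq.2 (hb pq List.mem_cons_self) t hsh]
    exact ih _ (fun x hx => hb x (List.mem_cons_of_mem _ hx))
      (pv_stepA_shape _ _ pq.1 pq.2 (hb pq List.mem_cons_self) t hsh)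

-- B's initial canvas is the canvas of the all-false tables
theorem pv_init_canvas (nr nc : Nat) :
    pvInitCanvas (nr : Int) (nc : Int) = pvCanvasOf (pvInitT (nr : Int) (nc : Int)) nr nc := by
  unfold pvInitCanvas pvCanvasOf
  rw [show (2 * (nr : Int) + 1) = ((2 * nr + 1 : Nat) : Int) by push_cast; ring,
      show (3 * (nc : Int) + 1) = ((3 * nc + 1 : Nat) : Int) by push_cast; ring,
      ]
  simp only [PySem.List.pyRange_zero_natCast, List.map_map, Function.comp_def]
  apply List.map_congr_left
  intro rr _
  apply List.map_congr_left
  intro cc _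
  have hm2 : (PySem.Int.mod ((rr : Nat) : Int) 2 = 0) ↔ rr % 2 = 0 := by
    rw [PySem.Int.mod_eq_emod_of_pos (by norm_num)]; omega
  have hm3 : (PySem.Int.mod ((cc : Nat) : Int) 3 = 0) ↔ cc % 3 = 0 := by
    rw [PySem.Int.mod_eq_emod_of_pos (by norm_num)]; omega
  have hl := pv_init_lookup (nr : Int) (nc : Int) ((rr / 2 : Nat) : Int) ((cc / 3 : Nat) : Int)
    (by positivity) (by positivity)
  simp only [Function.comp_def, pvCell, hl.1, hl.2]
  simp only [hm2, hm3]
  by_cases h2 : rr % 2 = 0 <;> by_cases h3 : cc % 3 = 0 <;> simp [h2, h3]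

-- interleaving splits of a mapped range
theorem pv_split3 {alpha : Type} (g : Nat → alpha) : ∀ n : Nat,
    (List.range (3 * n + 1)).map g
      = (List.range n).flatMap (fun c => [g (3 * c), g (3 * c + 1), g (3 * c + 2)]) ++ [g (3 * n)] := by
  intro n
  induction n with
  | zero => simp
  | succ k ih =>
    have h : 3 * (k + 1) + 1 = ((3 * k + 1) + 1) + 1 + 1 := by ring
    rw [h, List.range_succ, List.range_succ, List.range_succ, List.map_append, List.map_append,
        List.map_append, ih, List.range_succ, List.flatMap_append]
    rw [show (3 * k + 1) + 1 = 3 * k + 2 by omega, show (3 * k + 2) + 1 = 3 * (k + 1) by omega]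
    simp [List.append_assoc]

theorem pv_split2 {alpha : Type} (g : Nat → alpha) : ∀ n : Nat,
    (List.range (2 * n + 1)).map g
      = (List.range n).flatMap (fun i => [g (2 * i), g (2 * i + 1)]) ++ [g (2 * n)] := by
  intro n
  induction n with
  | zero => simp
  | succ k ih =>
    have h : 2 * (k + 1) + 1 = ((2 * k + 1) + 1) + 1 := by ring
    rw [h, List.range_succ, List.range_succ, List.map_append, List.map_append, ih,
        List.range_succ, List.flatMap_append]
    rw [show (2 * k + 1) + 1 = 2 * (k + 1) by omega]
    simp [List.append_assoc]

-- rendering: horizontal fold = flatten of cells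
theorem pv_hor_fold (f : Nat → Bool) (n : Nat) (acc : List Char) :
    (List.range n).foldl (fun buf c => (buf ++ ['+']) ++ (if f c then ['-', '-'] else [' ', ' '])) acc
      = acc ++ ((List.range n).map (fun c => if f c then ['+', '-', '-'] else ['+', ' ', ' '])).flatten := by
  rw [← List.flatMap_def, ← PySem.List.foldl_append_eq_flatMap]
  apply PySem.List.foldl_congr_mem
  intro buf c _
  by_cases h : f c <;> simp [h]

-- rendering: conditional-separator fold = flatMap + last
theorem pv_sep_fold (s : Nat → List Char) (sep : List Char) (m : Nat) (acc : List Char) :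
    (List.range (m + 1)).foldl
      (fun buf c => if c ≠ m then (buf ++ s c) ++ sep else buf ++ s c) acc
      = acc ++ ((List.range m).flatMap (fun c => s c ++ sep) ++ s m) := by
  rw [List.range_succ, List.foldl_append]
  have h1 : (List.range m).foldl (fun buf c => if c ≠ m then (buf ++ s c) ++ sep else buf ++ s c) acc
      = (List.range m).foldl (fun buf c => buf ++ (s c ++ sep)) acc := by
    apply PySem.List.foldl_congr_mem
    intro buf c hc
    rw [if_pos (by simp at hc; omega), List.append_assoc]
  rw [h1, PySem.List.foldl_append_eq_flatMap]
  simp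

theorem pv_join_cons (sep : List Char) (p : List Char) (ps : List (List Char)) (hps : ps ≠ []) :
    PySem.Chars.join sep (p :: ps) = p ++ sep ++ PySem.Chars.join sep ps := by
  cases ps with
  | nil => exact absurd rfl hps
  | cons q rest => exact PySem.Chars.join_cons_cons sep p q rest

theorem pv_join_lines : ∀ (L : List Nat) (hl vl : Nat → List Char) (last : List Char),
    PySem.Chars.join ['\n'] (L.flatMap (fun i => [hl i, vl i]) ++ [last]) ++ ['\n']
      = L.flatMap (fun i => hl i ++ ['\n'] ++ vl i ++ ['\n']) ++ (last ++ ['\n']) := by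
  intro L
  induction L with
  | nil => intro hl vl last; simp [PySem.Chars.join_singleton]
  | cons a t ih =>
    intro hl vl last
    simp only [List.flatMap_cons, List.cons_append, List.append_assoc]
    rw [pv_join_cons _ _ _ (by simp), pv_join_cons _ _ _ (by
      intro h
      have := congrArg List.length h
      simp at this)]
    have h := ih hl vl last
    simp only [List.append_assoc, List.nil_append] at h ⊢
    rw [h]
    simp

-- the horizontal canvas row equals A's horizontal fence line
theorem pv_hrow (t : List (List Bool) × List (List Bool)) (nc : Nat) (i : Nat) :
    (List.range (3 * nc + 1)).map (fun cc => pvCell t (2 * i) cc)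
      = ((List.range nc).map (fun (c : Nat) =>
          if pvLk1 t (i : Int) ((c : Nat) : Int) then ['+', '-', '-'] else ['+', ' ', ' '])).flatten
        ++ ['+'] := by
  rw [pv_split3]
  congr 1
  · have hfun : (fun c => [pvCell t (2 * i) (3 * c), pvCell t (2 * i) (3 * c + 1),
        pvCell t (2 * i) (3 * c + 2)])
        = (fun c : Nat => if pvLk1 t (i : Int) (c : Int) then ['+', '-', '-'] else ['+', ' ', ' ']) := by
      funext c
      rcases pv_cell_even t i c with ⟨ha, hb, hc⟩
      rw [ha, hb, hc]
      by_cases h : pvLk1 t (i : Int) (c : Int) <;> simp [h]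
    rw [hfun, List.flatMap_def]
  · rcases pv_cell_even t i nc with ⟨ha, -, -⟩
    rw [ha]

-- the vertical canvas row equals A's vertical fence line
theorem pv_vrow (t : List (List Bool) × List (List Bool)) (nc : Nat) (i : Nat) :
    (List.range (3 * nc + 1)).map (fun cc => pvCell t (2 * i + 1) cc)
      = (List.range nc).flatMap (fun (c : Nat) =>
          (if pvLk2 t (i : Int) ((c : Nat) : Int) then ['|'] else [' ']) ++ [' ', ' '])
        ++ (if pvLk2 t (i : Int) (nc : Int) then ['|'] else [' ']) := by
  rw [pv_split3]
  congr 1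
  · have hfun : (fun c => [pvCell t (2 * i + 1) (3 * c), pvCell t (2 * i + 1) (3 * c + 1),
        pvCell t (2 * i + 1) (3 * c + 2)])
        = (fun c : Nat => (if pvLk2 t (i : Int) (c : Int) then ['|'] else [' ']) ++ [' ', ' ']) := by
      funext c
      rcases pv_cell_odd t i c with ⟨ha, hb, hc⟩
      rw [ha, hb, hc]
      by_cases h : pvLk2 t (i : Int) (c : Int) <;> simp [h]
    rw [hfun]
  · rcases pv_cell_odd t i nc with ⟨ha, -, -⟩
    rw [ha]
    by_cases h : pvLk2 t (i : Int) (nc : Int) <;> simp [h]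

-- A's rendering pass equals joining the canvas rows
theorem pv_render (t : List (List Bool) × List (List Bool)) (nr nc : Nat) :
    pvRenderA t (nr : Int) (nc : Int)
      = PySem.Chars.join ['\n'] (pvCanvasOf t nr nc) ++ ['\n'] := by
  unfold pvRenderA pvCanvasOf
  rw [show ((nc : Int) + 1) = ((nc + 1 : Nat) : Int) by push_cast; ring]
  simp only [PySem.List.pyRange_zero_natCast, List.foldl_map, ne_eq, Nat.cast_inj]
  simp only [pv_hor_fold, pv_sep_fold]
  simp only [List.append_assoc, List.cons_append, List.nil_append]
  simp only [PySem.List.foldl_append_eq_flatMap, List.nil_append]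
  rw [pv_split2, pv_join_lines]
  simp only [pv_hrow, pv_vrow, pvLk1, pvLk2]
  simp only [List.append_assoc, List.cons_append, List.nil_append]
  rfl

-- ===== VERDICT (by name: the statement is the Claim_ definition above) =====
theorem helper_get_path_visual_spec : Claim_equal_helper_get_path_visual := by
  intro path num_rows num_cols hdom hpre
  unfold Spec_helper_get_path_visual
  obtain ⟨hnr0, hnc0, hok⟩ := hpre
  obtain ⟨nr, rfl⟩ : ∃ n : Nat, num_rows = (n : Int) := ⟨num_rows.toNat, (Int.toNat_of_nonneg hnr0).symm⟩
  obtain ⟨nc, rfl⟩ : ∃ n : Nat, num_cols = (n : Int) := ⟨num_cols.toNat, (Int.toNat_of_nonneg hnc0).symm⟩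
  rw [pvA_eq, pvB_eq, pvFenceA_eq, pvCanvasB_eq, pv_init_canvas,
      pv_canvas_fold nr nc (path.zip path.tail) _ hok (pv_init_shape _ _),
      pv_render]
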